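-- pv_equiv track=rewrite | github.com/hummodi6991/Oaktree-AI-Estimator | scripts/google_places_grid_search.py | _normalize_google_category
-- ===== SOURCE A (Python) =====
-- GOOGLE_TYPE_TO_CATEGORY = {
--     "restaurant": "international",
--     "cafe": "cafe",
--     "bakery": "bakery",
--     "meal_takeaway": "international",
--     "meal_delivery": "international",
--     "bar": "international",
--     "food": "international",
-- }
--
-- def _normalize_google_category(types: list[str]) -> str:
--     """Map Google place types to our restaurant_poi category."""
--     # Priority order: check specific types first
--     priority = [
--         "cafe", "bakery", "meal_takeaway", "meal_delivery",
--         "bar", "restaurant", "food",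
--     ]
--     for t in priority:
--         if t in types:
--             return GOOGLE_TYPE_TO_CATEGORY.get(t, "international")
--     return "international"
-- ===== SOURCE B (Python) =====
-- # One merged table: place type -> (priority rank, our category).
-- _RANKED = {
--     "cafe": (0, "cafe"),
--     "bakery": (1, "bakery"),
--     "meal_takeaway": (2, "international"),
--     "meal_delivery": (3, "international"),
--     "bar": (4, "international"),
--     "restaurant": (5, "international"),
--     "food": (6, "international"),
-- }
--
-- def _normalize_google_category(types: list[str]) -> str:
--     """Map Google place types to our restaurant_poi category.
--
--     Single pass over `types`, keeping the (rank, category) with smallest rank.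
--     """
--     best = None  # (rank, category)
--     for t in types:
--         rc = _RANKED.get(t)
--         if rc is not None and (best is None or rc[0] < best[0]):
--             best = rc
--     return best[1] if best is not None else "international"
-- ===== Notes on version B (the rewrite author's own statement) =====
-- stated objective: alternative
-- what changed: Instead of scanning the fixed priority list and testing membership in the input for each priority type, B makes a single pass over the input types keeping the (rank, category) pair of smallest rank from one merged type->(rank,category) table, then returns the kept category.
import Mathlib
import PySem

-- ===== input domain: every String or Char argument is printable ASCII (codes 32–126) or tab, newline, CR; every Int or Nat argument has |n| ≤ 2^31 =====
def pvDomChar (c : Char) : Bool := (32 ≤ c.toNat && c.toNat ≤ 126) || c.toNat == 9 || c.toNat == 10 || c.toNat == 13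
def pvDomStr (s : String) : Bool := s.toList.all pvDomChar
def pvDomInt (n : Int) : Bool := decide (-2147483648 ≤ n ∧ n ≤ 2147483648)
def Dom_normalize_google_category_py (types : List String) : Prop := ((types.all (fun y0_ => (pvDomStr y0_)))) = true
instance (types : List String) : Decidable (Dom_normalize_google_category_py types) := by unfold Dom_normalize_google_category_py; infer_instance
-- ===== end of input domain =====

-- B replaces A's scan over the fixed priority list with a single pass over the
-- input keeping the minimum-rank type; equivalent output, 'alternative' objective.

-- ===== PORT A =====
def GOOGLE_TYPE_TO_CATEGORY : PySem.Dict String String :=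
  PySem.Dict.ofList [("restaurant", "international"), ("cafe", "cafe"),
    ("bakery", "bakery"), ("meal_takeaway", "international"),
    ("meal_delivery", "international"), ("bar", "international"),
    ("food", "international")]

-- the 'for t in priority: if t in types: return …' loop of A
def normCatA_loop (priority : List String) (types : List String) : String :=
  match priority with
  | [] => "international"
  | t :: rest =>
      if t ∈ types then PySem.Dict.getD GOOGLE_TYPE_TO_CATEGORY t "international"
      else normCatA_loop rest types

def normalize_google_category_py (types : List String) : String :=
  normCatA_loop ["cafe", "bakery", "meal_takeaway", "meal_delivery",
                 "bar", "restaurant", "food"] types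

-- ===== PORT B =====
def RANKED_B : PySem.Dict String (Int × String) :=
  PySem.Dict.ofList [("cafe", (0, "cafe")), ("bakery", (1, "bakery")),
    ("meal_takeaway", (2, "international")), ("meal_delivery", (3, "international")),
    ("bar", (4, "international")), ("restaurant", (5, "international")),
    ("food", (6, "international"))]

-- body of B's 'for t in types' loop: keep the (rank, category) with smallest rank
def normCatB_step (best : Option (Int × String)) (t : String) : Option (Int × String) :=
  match PySem.Dict.get? RANKED_B t with
  | some rc =>
      match best with
      | none => some rc
      | some p => if rc.1 < p.1 then some rc else some p
  | none => best

def normalize_google_category_py_alt (types : List String) : String :=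
  match types.foldl normCatB_step none with
  | none => "international"
  | some p => p.2

-- ===== PRECONDITION & SPEC =====
def Spec_normalize_google_category_py (types : List String) (out : String) : Prop := out = normalize_google_category_py_alt types
instance (types : List String) (out : String) : Decidable (Spec_normalize_google_category_py types out) := by unfold Spec_normalize_google_category_py; infer_instance

-- ===== CLAIM (what is proved, stated in full; the proofs are below) =====
def Claim_equal_normalize_google_category_py : Prop := ∀ (types : List String), Dom_normalize_google_category_py types → Spec_normalize_google_category_py types (normalize_google_category_py types)

-- ===== LEMMAS AND PROOFS =====

-- left-biased minimum on optional (rank, type) pairs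
def ominP (a b : Option (Int × String)) : Option (Int × String) :=
  match a, b with
  | none, b => b
  | some p, none => some p
  | some p, some q => if q.1 < p.1 then some q else some p

def rankPair (t : String) : Option (Int × String) :=
  PySem.Dict.get? RANKED_B t

-- the leftmost minimal-rank ranked element of the list
def specBest : List String → Option (Int × String)
  | [] => none
  | t :: ts => ominP (rankPair t) (specBest ts)

theorem step_eq_ominP (b : Option (Int × String)) (t : String) :
    normCatB_step b t = ominP b (rankPair t) := by
  unfold normCatB_step ominP rankPair
  cases PySem.Dict.get? RANKED_B t <;> cases b <;> simp

theorem ominP_none_left (b : Option (Int × String)) : ominP none b = b := rfl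

theorem ominP_none_right (a : Option (Int × String)) : ominP a none = a := by
  cases a <;> rfl

theorem ominP_assoc (a b c : Option (Int × String)) :
    ominP (ominP a b) c = ominP a (ominP b c) := by
  rcases a with _ | ⟨ra, ta⟩
  · rfl
  rcases b with _ | ⟨rb, tb⟩
  · rfl
  rcases c with _ | ⟨rc, tc⟩
  · rw [ominP_none_right, ominP_none_right]
  simp only [ominP]
  split_ifs <;> (try simp only [ominP]) <;> split_ifs <;> first | rfl | omega

theorem rankPair_cafe : rankPair "cafe" = some (0, "cafe") := by decide
theorem rankPair_bakery : rankPair "bakery" = some (1, "bakery") := by decide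
theorem rankPair_mt : rankPair "meal_takeaway" = some (2, "international") := by decide
theorem rankPair_md : rankPair "meal_delivery" = some (3, "international") := by decide
theorem rankPair_bar : rankPair "bar" = some (4, "international") := by decide
theorem rankPair_rest : rankPair "restaurant" = some (5, "international") := by decide
theorem rankPair_food : rankPair "food" = some (6, "international") := by decide

theorem foldl_step_eq (ts : List String) :
    ∀ b, ts.foldl normCatB_step b = ominP b (specBest ts) := by
  induction ts with
  | nil => intro b; cases b <;> rfl
  | cons t ts ih =>
      intro b
      simp only [List.foldl_cons, step_eq_ominP, ih, specBest, ominP_assoc]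

theorem specBest_char (ts : List String) :
    specBest ts =
      if "cafe" ∈ ts then some (0, "cafe")
      else if "bakery" ∈ ts then some (1, "bakery")
      else if "meal_takeaway" ∈ ts then some (2, "international")
      else if "meal_delivery" ∈ ts then some (3, "international")
      else if "bar" ∈ ts then some (4, "international")
      else if "restaurant" ∈ ts then some (5, "international")
      else if "food" ∈ ts then some (6, "international")
      else none := by
  induction ts with
  | nil => simp [specBest]
  | cons t ts ih =>
      simp only [specBest, ih, List.mem_cons]
      by_cases h0 : t = "cafe"
      · subst h0; rw [rankPair_cafe]; simp only [String.reduceEq, false_or, true_or, if_true]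
        split_ifs <;> rfl
      by_cases h1 : t = "bakery"
      · subst h1; rw [rankPair_bakery]; simp only [String.reduceEq, false_or, true_or, if_true]
        split_ifs <;> rfl
      by_cases h2 : t = "meal_takeaway"
      · subst h2; rw [rankPair_mt]; simp only [String.reduceEq, false_or, true_or, if_true]
        split_ifs <;> rfl
      by_cases h3 : t = "meal_delivery"
      · subst h3; rw [rankPair_md]; simp only [String.reduceEq, false_or, true_or, if_true]
        split_ifs <;> rfl
      by_cases h4 : t = "bar"
      · subst h4; rw [rankPair_bar]; simp only [String.reduceEq, false_or, true_or, if_true]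
        split_ifs <;> rfl
      by_cases h5 : t = "restaurant"
      · subst h5; rw [rankPair_rest]; simp only [String.reduceEq, false_or, true_or, if_true]
        split_ifs <;> rfl
      by_cases h6 : t = "food"
      · subst h6; rw [rankPair_food]; simp only [String.reduceEq, false_or, true_or, if_true]
        split_ifs <;> rfl
      · have e : RANKED_B = PySem.Dict.mk [("cafe", (0, "cafe")), ("bakery", (1, "bakery")),
            ("meal_takeaway", (2, "international")), ("meal_delivery", (3, "international")),
            ("bar", (4, "international")), ("restaurant", (5, "international")),
            ("food", (6, "international"))] := by decide
        have hr : rankPair t = none := by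
          simp [rankPair, e, beq_iff_eq, Ne.symm h0, Ne.symm h1,
            Ne.symm h2, Ne.symm h3, Ne.symm h4, Ne.symm h5, Ne.symm h6, PySem.Dict.get?]
        rw [hr]
        simp only [Ne.symm h0, Ne.symm h1, Ne.symm h2, Ne.symm h3, Ne.symm h4, Ne.symm h5,
          Ne.symm h6, false_or]
        split_ifs <;> rfl

-- ===== VERDICT (by name: the statement is the Claim_ definition above) =====
theorem normalize_google_category_py_spec : Claim_equal_normalize_google_category_py := by
  intro types _
  unfold Spec_normalize_google_category_py
  unfold normalize_google_category_py_alt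
  rw [foldl_step_eq, ominP_none_left, specBest_char]
  simp only [normalize_google_category_py, normCatA_loop]
  split_ifs <;> rfl
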